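-- pv_equiv track=rewrite | github.com/gostreap/kidney_transplantations | src/simulation.py | get_stat_of_matching
-- ===== SOURCE A (Python) =====
-- def get_stat_of_matching(M):
--     total = 0
--     for (u, v) in M:
--         if u == v:
--             total += 1
--         else:
--             total += 2
--     return total
-- ===== SOURCE B (Python) =====
-- def get_stat_of_matching(M):
--     # Divide and conquer: split the matching in halves and recurse;
--     # a singleton contributes 1 if it is a self-loop, else 2.
--     if not M:
--         return 0
--     if len(M) == 1:
--         u, v = M[0]
--         return 1 if u == v else 2
--     mid = len(M) // 2
--     return get_stat_of_matching(M[:mid]) + get_stat_of_matching(M[mid:])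
-- ===== Notes on version B (the rewrite author's own statement) =====
-- stated objective: alternative
-- what changed: Replaced A's single-pass iterative branch-accumulator with a recursive divide-and-conquer that splits the list in halves and sums the two recursive weights, with empty/singleton base cases.
import Mathlib
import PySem

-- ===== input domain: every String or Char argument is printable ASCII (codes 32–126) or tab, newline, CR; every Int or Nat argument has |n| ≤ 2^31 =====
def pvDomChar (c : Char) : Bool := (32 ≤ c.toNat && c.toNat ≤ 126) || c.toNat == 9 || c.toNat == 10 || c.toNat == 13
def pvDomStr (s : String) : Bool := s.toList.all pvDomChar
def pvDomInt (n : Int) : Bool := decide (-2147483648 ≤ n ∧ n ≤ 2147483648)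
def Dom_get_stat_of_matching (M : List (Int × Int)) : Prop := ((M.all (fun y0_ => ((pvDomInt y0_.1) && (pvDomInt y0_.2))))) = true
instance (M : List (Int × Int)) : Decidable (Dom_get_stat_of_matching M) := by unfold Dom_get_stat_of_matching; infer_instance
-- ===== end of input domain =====

-- B replaces A's single-pass branch-accumulator by a divide-and-conquer
-- recursion on halves of the list (objective: alternative decomposition).

-- ===== PORT A =====
def get_stat_of_matching (M : List (Int × Int)) : Int :=
  M.foldl (fun total uv => if uv.1 = uv.2 then total + 1 else total + 2) 0

-- ===== PORT B =====
-- M[:mid] / M[mid:] with 0 ≤ mid ≤ len are exactly List.take / List.drop.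
def get_stat_of_matching_alt (M : List (Int × Int)) : Int :=
  if h0 : M = [] then 0
  else if h1 : M.length = 1 then
    (if (M.head!).1 = (M.head!).2 then 1 else 2)
  else
    let mid := M.length / 2
    get_stat_of_matching_alt (M.take mid) + get_stat_of_matching_alt (M.drop mid)
termination_by M.length
decreasing_by
  · simp only [List.length_take]
    have : M.length ≠ 0 := fun h => h0 (List.eq_nil_of_length_eq_zero h)
    omega
  · simp only [List.length_drop]
    have : M.length ≠ 0 := fun h => h0 (List.eq_nil_of_length_eq_zero h)
    omega

-- ===== PRECONDITION & SPEC =====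
def Spec_get_stat_of_matching (M : List (Int × Int)) (out : Int) : Prop := out = get_stat_of_matching_alt M
instance (M : List (Int × Int)) (out : Int) : Decidable (Spec_get_stat_of_matching M out) := by unfold Spec_get_stat_of_matching; infer_instance

-- ===== CLAIM (what is proved, stated in full; the proofs are below) =====
def Claim_equal_get_stat_of_matching : Prop := ∀ (M : List (Int × Int)), Dom_get_stat_of_matching M → Spec_get_stat_of_matching M (get_stat_of_matching M)

-- ===== LEMMAS AND PROOFS =====
def pvWeight (uv : Int × Int) : Int := if uv.1 = uv.2 then 1 else 2

theorem foldl_stat_shift (M : List (Int × Int)) (t : Int) :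
    M.foldl (fun total uv => if uv.1 = uv.2 then total + 1 else total + 2) t
      = t + (M.map pvWeight).sum := by
  induction M generalizing t with
  | nil => simp
  | cons x xs ih =>
    simp only [List.foldl_cons, List.map_cons, List.sum_cons, pvWeight]
    by_cases h : x.1 = x.2 <;> simp [h, ih] <;> ring

theorem alt_eq_sum (M : List (Int × Int)) :
    get_stat_of_matching_alt M = (M.map pvWeight).sum := by
  rw [get_stat_of_matching_alt]
  by_cases h0 : M = []
  · simp [h0]
  · simp only [h0, if_false]
    by_cases h1 : M.length = 1
    · obtain ⟨x, rest, rfl⟩ := List.exists_cons_of_ne_nil h0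
      simp at h1
      subst h1
      simp [pvWeight, List.head!]
    · simp only [h1, dif_neg, not_false_iff]
      have ht := alt_eq_sum (M.take (M.length / 2))
      have hd := alt_eq_sum (M.drop (M.length / 2))
      rw [ht, hd, ← List.sum_append, ← List.map_append, List.take_append_drop]
termination_by M.length
decreasing_by
  · simp only [List.length_take]
    have : M.length ≠ 0 := fun h => h0 (List.eq_nil_of_length_eq_zero h)
    omega
  · simp only [List.length_drop]
    have : M.length ≠ 0 := fun h => h0 (List.eq_nil_of_length_eq_zero h)
    omega

-- ===== VERDICT (by name: the statement is the Claim_ definition above) =====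
theorem get_stat_of_matching_spec : Claim_equal_get_stat_of_matching := by
  intro M _
  unfold Spec_get_stat_of_matching get_stat_of_matching
  rw [alt_eq_sum, foldl_stat_shift]
  ring
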